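-- pv_equiv track=rewrite | github.com/trueSnevar/algos_data_structures | sprint_1/sprint_1_B.py | sleight_of_hand
-- ===== SOURCE A (Python) =====
-- from typing import List, Tuple
--
-- def sleight_of_hand(k: int, grid: List[str]) -> int:
--     score = 0
--     for round in range(10):
--         num = 0
--         for item in grid:
--             if str(round) in item:
--                 num += item.count(str(round))
--         if num > 0 and num <= (2*k):
--             score += 1
--     return score
-- ===== SOURCE B (Python) =====
-- def sleight_of_hand(k, grid):
--     freq = [0] * 10
--     for item in grid:
--         for ch in item:
--             if ch.isdigit():
--                 freq[int(ch)] += 1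
--     score = 0
--     for d in range(10):
--         if 0 < freq[d] <= 2 * k:
--             score += 1
--     return score
-- ===== Notes on version B (the rewrite author's own statement) =====
-- stated objective: faster
-- what changed: Replaces ten full scans of the grid (one per digit, each doing a substring membership test plus a substring count) with a single pass that tallies digit characters into a length-10 frequency list, followed by a separate scoring loop over the ten tallies.
import Mathlib
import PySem

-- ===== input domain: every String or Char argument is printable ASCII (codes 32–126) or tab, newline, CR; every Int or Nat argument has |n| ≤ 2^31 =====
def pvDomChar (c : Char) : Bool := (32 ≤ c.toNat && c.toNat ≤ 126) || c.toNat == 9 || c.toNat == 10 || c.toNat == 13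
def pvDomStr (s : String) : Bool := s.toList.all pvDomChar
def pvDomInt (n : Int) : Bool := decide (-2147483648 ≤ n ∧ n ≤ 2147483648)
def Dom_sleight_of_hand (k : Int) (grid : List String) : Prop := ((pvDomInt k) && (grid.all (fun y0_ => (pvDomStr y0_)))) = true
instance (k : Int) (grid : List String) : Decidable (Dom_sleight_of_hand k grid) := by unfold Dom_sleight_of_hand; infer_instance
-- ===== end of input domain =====

-- B replaces A's ten per-digit scans of the grid with one tally pass over all characters
-- into a length-10 frequency list, then a scoring loop over the ten tallies (objective: faster, constant factor).


-- ===== PORT A =====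
-- for round in range(10): scan the whole grid, counting occurrences of str(round)
def sleight_of_hand (k : Int) (grid : List String) : Int :=
  (PySem.List.pyRange 0 10 1).foldl (fun score round =>
    let num : Int := grid.foldl (fun num item =>
      if PySem.Str.isIn (PySem.Int.toStr round) item then
        num + (PySem.Str.count item (PySem.Int.toStr round) : Int)
      else num) 0
    if num > 0 ∧ num ≤ 2 * k then score + 1 else score) 0

-- ===== PORT B =====
-- ch.isdigit() is exactly '0' ≤ ch ≤ '9' on the ASCII domain
def pvTallyChar (freq : List Int) (ch : Char) : List Int :=
  if '0' ≤ ch ∧ ch ≤ '9' then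
    freq.set (ch.toNat - 48) (freq.getD (ch.toNat - 48) 0 + 1)
  else freq

def sleight_of_hand_alt (k : Int) (grid : List String) : Int :=
  let freq : List Int :=
    grid.foldl (fun freq item => item.toList.foldl pvTallyChar freq)
      (List.replicate 10 0)
  (List.range 10).foldl (fun score d =>
    if 0 < freq.getD d 0 ∧ freq.getD d 0 ≤ 2 * k then score + 1 else score) 0

-- ===== PRECONDITION & SPEC =====
def Spec_sleight_of_hand (k : Int) (grid : List String) (out : Int) : Prop := out = sleight_of_hand_alt k grid
instance (k : Int) (grid : List String) (out : Int) : Decidable (Spec_sleight_of_hand k grid out) := by unfold Spec_sleight_of_hand; infer_instance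

-- ===== CLAIM (what is proved, stated in full; the proofs are below) =====
def Claim_equal_sleight_of_hand : Prop := ∀ (k : Int) (grid : List String), Dom_sleight_of_hand k grid → Spec_sleight_of_hand k grid (sleight_of_hand k grid)

-- ===== LEMMAS AND PROOFS =====

-- the per-item total of occurrences of the single character c, as an Int
def pvCnt (c : Char) (grid : List String) : Int :=
  (grid.map (fun s => (s.toList.count c : Int))).sum

-- substring count of a single-character pattern is the character count
theorem pv_count_go_single (c : Char) :
    ∀ (fuel : Nat) (l : List Char) (acc : Nat), l.length ≤ fuel →
      PySem.Chars.count.go [c] fuel l acc = acc + l.count c := by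
  intro fuel
  induction fuel with
  | zero =>
    intro l acc h
    have : l = [] := List.length_eq_zero_iff.mp (Nat.le_zero.mp h)
    subst this
    simp [PySem.Chars.count.go]
  | succ n ih =>
    intro l acc h
    cases l with
    | nil => simp [PySem.Chars.count.go]
    | cons hd t =>
      simp only [PySem.Chars.count.go]
      by_cases hc : c = hd
      · subst hc
        have hp : [c].isPrefixOf (c :: t) = true := by
          simp [List.isPrefixOf]
        rw [if_pos hp]
        have : List.drop ([c].length) (c :: t) = t := by simp
        rw [this, ih t (acc + 1) (by simpa using Nat.lt_succ_iff.mp (by simpa using h))]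
        simp
        omega
      · have hp : [c].isPrefixOf (hd :: t) = false := by
          simp [List.isPrefixOf, hc]
        rw [if_neg (by simp [hp])]
        rw [ih t acc (by simpa using Nat.lt_succ_iff.mp (by simpa using h))]
        simp [List.count_cons]
        exact fun h => hc h.symm

theorem pv_count_single (s : List Char) (c : Char) :
    PySem.Chars.count s [c] = s.count c := by
  have : ([c] : List Char).isEmpty = false := rfl
  rw [PySem.Chars.count, this]
  simpa using pv_count_go_single c s.length s 0 le_rfl

-- A's inner fold over the grid equals acc + total count of the character
theorem pv_inner_fold (c : Char) (sub : String) (hsub : sub.toList = [c]) :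
    ∀ (grid : List String) (acc : Int),
      grid.foldl (fun num item =>
        if PySem.Str.isIn sub item then
          num + (PySem.Str.count item sub : Int)
        else num) acc = acc + pvCnt c grid := by
  intro grid
  induction grid with
  | nil => intro acc; simp [pvCnt]
  | cons item rest ih =>
    intro acc
    simp only [List.foldl_cons]
    have hcount : PySem.Str.count item sub = item.toList.count c := by
      have : PySem.Str.count item sub = PySem.Chars.count item.toList sub.toList := by
        simp
      rw [this, hsub, pv_count_single]
    by_cases hin : PySem.Str.isIn sub item = true
    · rw [if_pos hin, ih, hcount]
      simp only [pvCnt, List.map_cons, List.sum_cons]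
      ring
    · rw [if_neg hin, ih]
      have hzero : item.toList.count c = 0 := by
        have hni : ¬ sub.toList <:+: item.toList := by
          rw [← PySem.Str.isIn_iff_infix]
          simpa using hin
        rw [hsub] at hni
        have : c ∉ item.toList := by
          intro hc
          obtain ⟨l1, l2, hl⟩ := List.append_of_mem hc
          exact hni ⟨l1, l2, by simp [hl]⟩
        exact List.count_eq_zero.mpr this
      simp [pvCnt, hzero]

-- tally fold facts: length is preserved and entry d accumulates the count of its digit
theorem pv_tally_length (cs : List Char) :
    ∀ freq : List Int, (cs.foldl pvTallyChar freq).length = freq.length := by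
  induction cs with
  | nil => intro freq; rfl
  | cons ch t ih =>
    intro freq
    simp only [List.foldl_cons, ih]
    unfold pvTallyChar
    split <;> simp

theorem pv_char_le_iff (a b : Char) : a ≤ b ↔ a.toNat ≤ b.toNat := by
  rw [Char.le_def, UInt32.le_iff_toNat_le]; rfl

theorem pv_toNat_ofNat (n : Nat) (h : n < 128) : (Char.ofNat n).toNat = n := by
  unfold Char.ofNat
  rw [dif_pos (by left; omega)]
  rfl

theorem pv_char_eq_of_toNat (a b : Char) (h : a.toNat = b.toNat) : a = b := by
  cases a; cases b
  simp only [Char.toNat] at h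
  congr 1
  exact UInt32.toNat_inj.mp h

theorem pv_tally_getD (cs : List Char) :
    ∀ (freq : List Int), freq.length = 10 → ∀ d : Nat, d < 10 →
      (cs.foldl pvTallyChar freq).getD d 0
        = freq.getD d 0 + (cs.count (Char.ofNat (48 + d)) : Int) := by
  induction cs with
  | nil => intro freq _ d _; simp
  | cons ch t ih =>
    intro freq hlen d hd
    simp only [List.foldl_cons]
    have hlen' : (pvTallyChar freq ch).length = 10 := by
      unfold pvTallyChar; split <;> simp [hlen]
    rw [ih (pvTallyChar freq ch) hlen' d hd]
    have hgoal : (pvTallyChar freq ch).getD d 0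
        = freq.getD d 0 + (if ch = Char.ofNat (48 + d) then 1 else 0) := by
      unfold pvTallyChar
      by_cases hdig : '0' ≤ ch ∧ ch ≤ '9'
      · rw [if_pos hdig]
        have h48 : 48 ≤ ch.toNat ∧ ch.toNat ≤ 57 :=
          ⟨(pv_char_le_iff '0' ch).mp hdig.1, (pv_char_le_iff ch '9').mp hdig.2⟩
        by_cases heq : ch.toNat - 48 = d
        · have hch : ch = Char.ofNat (48 + d) := by
            apply pv_char_eq_of_toNat
            rw [pv_toNat_ofNat _ (by omega)]
            omega
          rw [if_pos hch, heq]
          simp [List.getD, (by omega : d < freq.length)]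
        · have hch : ¬ ch = Char.ofNat (48 + d) := by
            intro hc
            apply heq
            have hn : ch.toNat = 48 + d := by
              rw [hc]; exact pv_toNat_ofNat _ (by omega)
            omega
          rw [if_neg hch]
          simp [List.getD, List.getElem?_set_ne heq]
      · rw [if_neg hdig]
        have hch : ¬ ch = Char.ofNat (48 + d) := by
          intro hc
          apply hdig
          have hn : ch.toNat = 48 + d := by
            rw [hc]; exact pv_toNat_ofNat _ (by omega)
          have h0 : ('0' : Char).toNat = 48 := rfl
          have h9 : ('9' : Char).toNat = 57 := rfl
          exact ⟨(pv_char_le_iff '0' ch).mpr (by omega),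
                 (pv_char_le_iff ch '9').mpr (by omega)⟩
        simp [hch]
    rw [hgoal]
    by_cases h : ch = Char.ofNat (48 + d) <;> simp [h] <;> ring

theorem pv_grid_tally (grid : List String) :
    ∀ (freq : List Int), freq.length = 10 → ∀ d : Nat, d < 10 →
      (grid.foldl (fun f item => item.toList.foldl pvTallyChar f) freq).getD d 0
        = freq.getD d 0 + pvCnt (Char.ofNat (48 + d)) grid := by
  induction grid with
  | nil => intro freq _ d _; simp [pvCnt]
  | cons item rest ih =>
    intro freq hlen d hd
    simp only [List.foldl_cons]
    have hlen' : (item.toList.foldl pvTallyChar freq).length = 10 := by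
      rw [pv_tally_length]; exact hlen
    rw [ih _ hlen' d hd, pv_tally_getD item.toList freq hlen d hd]
    simp [pvCnt]
    ring

-- ===== VERDICT (by name: the statement is the Claim_ definition above) =====
theorem sleight_of_hand_spec : Claim_equal_sleight_of_hand := by
  intro k grid _
  unfold Spec_sleight_of_hand sleight_of_hand sleight_of_hand_alt
  have hrange : PySem.List.pyRange 0 10 1 = [0,1,2,3,4,5,6,7,8,9] := by decide
  have hR : List.range 10 = [0,1,2,3,4,5,6,7,8,9] := by decide
  rw [hrange, hR]
  simp only [List.foldl_cons, List.foldl_nil]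
  have hfreq : ∀ d : Nat, d < 10 →
      (grid.foldl (fun f item => item.toList.foldl pvTallyChar f)
        (List.replicate 10 (0 : Int))).getD d 0 = pvCnt (Char.ofNat (48 + d)) grid := by
    intro d hd
    rw [pv_grid_tally grid (List.replicate 10 0) (by simp) d hd]
    simp [List.getD, hd]
    interval_cases d <;> rfl
  have hnum : ∀ (r : Int) (c : Char), (PySem.Int.toStr r).toList = [c] →
      grid.foldl (fun num item =>
        if PySem.Str.isIn (PySem.Int.toStr r) item then
          num + (PySem.Str.count item (PySem.Int.toStr r) : Int)
        else num) 0 = pvCnt c grid := by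
    intro r c hc
    rw [pv_inner_fold c _ hc grid 0]
    simp
  rw [hnum 0 (Char.ofNat 48) (by decide), hnum 1 (Char.ofNat 49) (by decide),
      hnum 2 (Char.ofNat 50) (by decide), hnum 3 (Char.ofNat 51) (by decide),
      hnum 4 (Char.ofNat 52) (by decide), hnum 5 (Char.ofNat 53) (by decide),
      hnum 6 (Char.ofNat 54) (by decide), hnum 7 (Char.ofNat 55) (by decide),
      hnum 8 (Char.ofNat 56) (by decide), hnum 9 (Char.ofNat 57) (by decide)]
  rw [hfreq 0 (by omega), hfreq 1 (by omega), hfreq 2 (by omega), hfreq 3 (by omega),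
      hfreq 4 (by omega), hfreq 5 (by omega), hfreq 6 (by omega), hfreq 7 (by omega),
      hfreq 8 (by omega), hfreq 9 (by omega)]
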